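-- pv_equiv track=rewrite | github.com/IslamAbukoush/manhwaScraper | main.py | detect_num_index
-- ===== SOURCE A (Python) =====
-- def detect_num_index(s):
--     e = -1
--     b = -1
--     for i in reversed(range(len(s))):
--         if s[i].isnumeric():
--             e = i + 1
--             while i >= 0 and s[i].isnumeric():
--                 i -= 1
--             b = i + 1
--             break
--     if e >= len(s):
--         return [s[:b], "/"]
--     return [s[:b], s[e:]]
-- ===== SOURCE B (Python) =====
-- def detect_num_index(s):
--     # single forward pass: record each numeric run's bounds, so the last run survives
--     b = -1
--     e = -1
--     n = len(s)
--     i = 0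
--     while i < n:
--         if s[i].isnumeric():
--             start = i
--             i += 1
--             while i < n and s[i].isnumeric():
--                 i += 1
--             b, e = start, i
--         else:
--             i += 1
--     if e >= n:
--         return [s[:b], "/"]
--     return [s[:b], s[e:]]
-- ===== Notes on version B (the rewrite author's own statement) =====
-- stated objective: alternative
-- what changed: Replaced A's reversed scan with an inner backtracking while-loop and break by a single left-to-right pass that records each numeric run's bounds as it passes it, so the last run's bounds survive; no reversed iteration, no backward walk, no break.
import Mathlib
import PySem

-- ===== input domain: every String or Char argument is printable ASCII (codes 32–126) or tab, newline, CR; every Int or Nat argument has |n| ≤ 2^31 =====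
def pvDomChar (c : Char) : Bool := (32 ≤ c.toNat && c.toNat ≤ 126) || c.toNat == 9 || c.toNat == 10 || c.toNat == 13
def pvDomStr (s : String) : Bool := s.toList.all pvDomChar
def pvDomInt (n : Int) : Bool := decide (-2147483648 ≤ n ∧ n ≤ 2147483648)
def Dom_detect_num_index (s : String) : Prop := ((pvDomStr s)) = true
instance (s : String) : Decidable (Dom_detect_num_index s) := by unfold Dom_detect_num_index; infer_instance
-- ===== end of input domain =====

-- B replaces A's reversed scan + backward inner walk + break by one forward pass that
-- overwrites the recorded run bounds, so the last numeric run survives (objective: alternative).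

-- ===== PORT A =====
-- s[i].isnumeric(): on the printable-ASCII domain this is exactly '0' ≤ c ≤ '9'
def pvIsNum (c : Char) : Bool := c.isDigit

-- inner 'while i >= 0 and s[i].isnumeric(): i -= 1' followed by 'b = i + 1'
-- (every index read here is in range at the call sites; getD is that in-range read)
def pvAWhile (cs : List Char) : Nat → Int
  | 0 => if pvIsNum (cs.getD 0 ' ') then 0 else 1
  | (i+1) => if pvIsNum (cs.getD (i+1) ' ') then pvAWhile cs i else ((i : Int) + 2)

-- 'for i in reversed(range(len(s)))' with the break: scan k-1, k-2, … until numeric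
def pvAScan (cs : List Char) : Nat → Int × Int
  | 0 => (-1, -1)
  | (i+1) => if pvIsNum (cs.getD i ' ') then (pvAWhile cs i, (i : Int) + 1) else pvAScan cs i

def detect_num_index (s : String) : List String :=
  if (pvAScan s.toList s.toList.length).2 ≥ (s.toList.length : Int) then
    [PySem.Str.slice s none (some (pvAScan s.toList s.toList.length).1), "/"]
  else
    [PySem.Str.slice s none (some (pvAScan s.toList s.toList.length).1),
     PySem.Str.slice s (some (pvAScan s.toList s.toList.length).2) none]

-- ===== PORT B =====
-- inner 'while i < n and s[i].isnumeric(): i += 1'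
def pvBRun (cs : List Char) (n : Nat) (i : Nat) : Nat :=
  if i < n ∧ pvIsNum (cs.getD i ' ') then pvBRun cs n (i+1) else i
termination_by n - i
decreasing_by omega

theorem pvBRun_ge (cs : List Char) (n i : Nat) : i ≤ pvBRun cs n i := by
  fun_induction pvBRun cs n i with
  | case1 i h ih => omega
  | case2 i h => omega

-- outer 'while i < n', recording (b, e) := (start, i) at the end of each numeric run
def pvBScan (cs : List Char) (n : Nat) (i : Nat) (b e : Int) : Int × Int :=
  if i < n then
    if pvIsNum (cs.getD i ' ') then
      pvBScan cs n (pvBRun cs n (i+1)) (i : Int) ((pvBRun cs n (i+1) : Int))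
    else pvBScan cs n (i+1) b e
  else (b, e)
termination_by n - i
decreasing_by
  · have := pvBRun_ge cs n (i+1); omega
  · omega

def detect_num_index_alt (s : String) : List String :=
  if (pvBScan s.toList s.toList.length 0 (-1) (-1)).2 ≥ (s.toList.length : Int) then
    [PySem.Str.slice s none (some (pvBScan s.toList s.toList.length 0 (-1) (-1)).1), "/"]
  else
    [PySem.Str.slice s none (some (pvBScan s.toList s.toList.length 0 (-1) (-1)).1),
     PySem.Str.slice s (some (pvBScan s.toList s.toList.length 0 (-1) (-1)).2) none]

-- ===== PRECONDITION & SPEC =====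
def Spec_detect_num_index (s : String) (out : List String) : Prop := out = detect_num_index_alt s
instance (s : String) (out : List String) : Decidable (Spec_detect_num_index s out) := by unfold Spec_detect_num_index; infer_instance

-- ===== CLAIM (what is proved, stated in full; the proofs are below) =====
def Claim_equal_detect_num_index : Prop := ∀ (s : String), Dom_detect_num_index s → Spec_detect_num_index s (detect_num_index s)

-- ===== LEMMAS AND PROOFS =====

-- the backward walk lands exactly on the start of a digit run
theorem pvAWhile_eq (cs : List Char) (k i : Nat) (hik : i ≤ k)
    (hd : ∀ m, i ≤ m → m ≤ k → pvIsNum (cs.getD m ' ') = true)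
    (hstart : i = 0 ∨ pvIsNum (cs.getD (i-1) ' ') = false) :
    pvAWhile cs k = (i : Int) := by
  induction k with
  | zero =>
    obtain rfl : i = 0 := by omega
    simp only [pvAWhile, hd 0 (by omega) (by omega), if_true, Nat.cast_zero]
  | succ k ih =>
    rw [pvAWhile, if_pos (hd (k+1) (by omega) (by omega))]
    by_cases hik' : i ≤ k
    · exact ih hik' (fun m h1 h2 => hd m h1 (by omega))
    · obtain rfl : i = k + 1 := by omega
      rcases hstart with h0 | hfalse
      · omega
      · simp only [Nat.add_sub_cancel] at hfalse
        cases k with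
        | zero =>
          simp only [pvAWhile, hfalse, Bool.false_eq_true, if_false]
          norm_num
        | succ j =>
          rw [pvAWhile, if_neg (by simp only [hfalse]; exact Bool.false_ne_true)]
          push_cast; ring

-- A's outer loop skips a digit-free top segment
theorem pvAScan_skip (cs : List Char) (k j : Nat) (hjk : j ≤ k)
    (h : ∀ m, j ≤ m → m < k → pvIsNum (cs.getD m ' ') = false) :
    pvAScan cs k = pvAScan cs j := by
  induction k with
  | zero =>
    obtain rfl : j = 0 := by omega
    rfl
  | succ k ih =>
    by_cases hj : j = k + 1
    · subst hj; rfl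
    · rw [pvAScan, if_neg (by simp only [h k (by omega) (by omega)]; exact Bool.false_ne_true)]
      exact ih (by omega) (fun m h1 h2 => h m h1 (by omega))

theorem pvBRun_le (cs : List Char) (n i : Nat) (h : i ≤ n) : pvBRun cs n i ≤ n := by
  fun_induction pvBRun cs n i with
  | case1 i hc ih => exact ih (by omega)
  | case2 i hc => omega

theorem pvBRun_digits (cs : List Char) (n i : Nat) :
    ∀ m, i ≤ m → m < pvBRun cs n i → pvIsNum (cs.getD m ' ') = true := by
  fun_induction pvBRun cs n i with
  | case1 i hc ih =>
    intro m h1 h2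
    by_cases hmi : m = i
    · subst hmi; exact hc.2
    · exact ih m (by omega) h2
  | case2 i hc => intro m h1 h2; omega

theorem pvBRun_stop (cs : List Char) (n i : Nat) (h : i ≤ n) :
    pvBRun cs n i = n ∨ pvIsNum (cs.getD (pvBRun cs n i) ' ') = false := by
  fun_induction pvBRun cs n i with
  | case1 i hc ih => exact ih (by omega)
  | case2 i hc =>
    by_cases hn : i < n
    · right
      by_cases hd : pvIsNum (cs.getD i ' ') = true
      · exact absurd ⟨hn, hd⟩ hc
      · simpa using hd
    · left; omega

-- main invariant: B's forward loop returns A's reversed-scan value as soon as a digit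
-- remains ahead, and the accumulated (b, e) otherwise
theorem pvBScan_eq_aux (cs : List Char) (fuel : Nat) :
    ∀ i b e, cs.length - i ≤ fuel → i ≤ cs.length →
    (pvIsNum (cs.getD i ' ') = true → i = 0 ∨ pvIsNum (cs.getD (i-1) ' ') = false) →
    pvBScan cs cs.length i b e =
      if ∃ j < cs.length, i ≤ j ∧ pvIsNum (cs.getD j ' ') = true
      then pvAScan cs cs.length else (b, e) := by
  induction fuel with
  | zero =>
    intro i b e hfuel hin hstart
    obtain rfl : i = cs.length := by omega
    rw [pvBScan, if_neg (by omega), if_neg]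
    rintro ⟨j, h1, h2, _⟩; omega
  | succ fuel ih =>
    intro i b e hfuel hin hstart
    by_cases hi : i < cs.length
    · rw [pvBScan, if_pos hi]
      by_cases hd : pvIsNum (cs.getD i ' ') = true
      · rw [if_pos hd]
        set j := pvBRun cs cs.length (i+1) with hj
        have hji : i + 1 ≤ j := pvBRun_ge cs cs.length (i+1)
        have hjn : j ≤ cs.length := pvBRun_le cs cs.length (i+1) (by omega)
        have hrun : ∀ m, i ≤ m → m < j → pvIsNum (cs.getD m ' ') = true := by
          intro m h1 h2
          by_cases hmi : m = i
          · subst hmi; exact hd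
          · exact pvBRun_digits cs cs.length (i+1) m (by omega) h2
        have hjstart : pvIsNum (cs.getD j ' ') = true → j = 0 ∨ pvIsNum (cs.getD (j-1) ' ') = false := by
          intro hdj
          rcases pvBRun_stop cs cs.length (i+1) (by omega) with hn | hf
          · rw [← hj] at hn
            rw [hn] at hdj
            simp [List.getD, pvIsNum] at hdj
          · rw [← hj] at hf
            rw [hdj] at hf
            exact absurd hf (by simp)
        rw [ih j (i : Int) (j : Int) (by omega) hjn hjstart]
        by_cases hex : ∃ m < cs.length, j ≤ m ∧ pvIsNum (cs.getD m ' ') = true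
        · rw [if_pos hex, if_pos]
          obtain ⟨m, h1, h2, h3⟩ := hex
          exact ⟨m, h1, by omega, h3⟩
        · rw [if_neg hex, if_pos ⟨i, hi, by omega, hd⟩]
          -- no digits in [j, n): A's reversed scan finds exactly the run [i, j)
          push Not at hex
          clear_value j
          rw [pvAScan_skip cs cs.length j hjn (fun m h1 h2 => by
            by_contra hcon
            exact hex m h2 h1 (by simpa using hcon))]
          obtain ⟨j', rfl⟩ : ∃ j', j = j' + 1 := ⟨j - 1, by omega⟩
          rw [pvAScan, if_pos (hrun j' (by omega) (by omega))]
          rw [pvAWhile_eq cs j' i (by omega) (fun m h1 h2 => hrun m h1 (by omega)) (hstart hd)]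
          push_cast
          rfl
      · rw [if_neg hd]
        rw [ih (i+1) b e (by omega) (by omega) (by intro _; right; simpa using hd)]
        congr 1
        simp only [eq_iff_iff]
        constructor
        · rintro ⟨m, h1, h2, h3⟩; exact ⟨m, h1, by omega, h3⟩
        · rintro ⟨m, h1, h2, h3⟩
          refine ⟨m, h1, ?_, h3⟩
          by_cases hmi : m = i
          · subst hmi; exact absurd h3 hd
          · omega
    · obtain rfl : i = cs.length := by omega
      rw [pvBScan, if_neg (by omega), if_neg]
      rintro ⟨j, h1, h2, _⟩; omega

theorem pvScan_bridge (cs : List Char) :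
    pvBScan cs cs.length 0 (-1) (-1) = pvAScan cs cs.length := by
  rw [pvBScan_eq_aux cs cs.length 0 (-1) (-1) (by omega) (by omega) (fun _ => Or.inl rfl)]
  by_cases hex : ∃ j < cs.length, 0 ≤ j ∧ pvIsNum (cs.getD j ' ') = true
  · rw [if_pos hex]
  · rw [if_neg hex]
    push Not at hex
    rw [pvAScan_skip cs cs.length 0 (by omega) (fun m h1 h2 => by
      by_contra hcon
      exact hex m h2 h1 (by simpa using hcon))]
    rfl

-- ===== VERDICT (by name: the statement is the Claim_ definition above) =====
theorem detect_num_index_spec : Claim_equal_detect_num_index := by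
  intro s _
  unfold Spec_detect_num_index detect_num_index detect_num_index_alt
  rw [pvScan_bridge]
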